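-- pv_equiv track=rewrite | github.com/venkataravikumaralladi/CyberSecurityTools | reconnasissance/generate_password_variations.py | gen_variations
-- ===== SOURCE A (Python) =====
-- common_subs = {
--   'a' : ['@', '4'],
--   'b' : ['8'],
--   'e' : ['3'],
--   'g' : ['6', '9'],
--   'i' : ['1', '!'],
--   'o' : ['0'],
--   's' : ['5', '$'],
--   't' : ['7', '+']
-- }
--
-- def gen_variations(password):
--     password_variations = ['']
--
--     for p in password:
--         uppers = [v+p.upper() for v in password_variations]
--         lowers = [v+p.lower() for v in password_variations]
--         # note: here uppers and lowers are lists so we are appending lists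
--         vs = uppers + lowers
--         if p in common_subs:
--             for s in common_subs[p]:
--                 x = [v+s for v in password_variations]
--                 vs += x
--         password_variations = vs
--     return password_variations
-- ===== SOURCE B (Python) =====
-- common_subs = {
--   'a' : ['@', '4'],
--   'b' : ['8'],
--   'e' : ['3'],
--   'g' : ['6', '9'],
--   'i' : ['1', '!'],
--   'o' : ['0'],
--   's' : ['5', '$'],
--   't' : ['7', '+']
-- }
--
-- def gen_variations(password):
--     # recursion on the last character: per-character option list, back-to-front build
--     if not password:
--         return ['']
--     c = password[-1]
--     prefixes = gen_variations(password[:-1])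
--     opts = [c.upper(), c.lower()] + common_subs.get(c, [])
--     return [v + o for o in opts for v in prefixes]
-- ===== Notes on version B (the rewrite author's own statement) =====
-- stated objective: idiomatic
-- what changed: Replaces A's forward accumulator loop (building uppers/lowers/substitution lists separately and concatenating each step) with recursion on the last character plus a single per-character option list [upper, lower] + subs consumed by one nested comprehension.
import Mathlib
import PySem

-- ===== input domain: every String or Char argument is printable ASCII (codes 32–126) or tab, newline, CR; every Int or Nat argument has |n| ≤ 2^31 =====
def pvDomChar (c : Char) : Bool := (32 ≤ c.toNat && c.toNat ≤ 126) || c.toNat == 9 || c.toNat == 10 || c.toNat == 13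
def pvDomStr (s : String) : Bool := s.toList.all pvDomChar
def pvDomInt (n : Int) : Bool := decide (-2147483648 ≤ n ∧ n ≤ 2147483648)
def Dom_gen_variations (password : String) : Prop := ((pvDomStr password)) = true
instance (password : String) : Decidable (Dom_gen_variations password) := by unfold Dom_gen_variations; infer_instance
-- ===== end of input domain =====

-- B replaces A's forward accumulation (three separately built lists concatenated per step)
-- by recursion on the last character with a single per-character option list (idiomatic decomposition).
-- Variations are built as List Char and converted by String.ofList at the end: exact for the
-- string concatenations both Pythons perform.

-- ===== PORT A =====
-- the module constant common_subs (substitution strings as List Char)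
def commonSubs : PySem.Dict Char (List (List Char)) :=
  PySem.Dict.ofList
    [('a', [['@'], ['4']]), ('b', [['8']]), ('e', [['3']]), ('g', [['6'], ['9']]),
     ('i', [['1'], ['!']]), ('o', [['0']]), ('s', [['5'], ['$']]), ('t', [['7'], ['+']])]

-- one iteration of A's `for p in password` loop
def pvStepA (pv : List (List Char)) (p : Char) : List (List Char) :=
  let uppers := pv.map (fun v => v ++ [p.toUpper])
  let lowers := pv.map (fun v => v ++ [p.toLower])
  let vs := uppers ++ lowers
  match PySem.Dict.get? commonSubs p with   -- `if p in common_subs`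
  | some subs => subs.foldl (fun vs s => vs ++ pv.map (fun v => v ++ s)) vs
  | none => vs

def gen_variations (password : String) : List String :=
  (password.toList.foldl pvStepA [[]]).map (fun v => String.ofList v)

-- ===== PORT B =====
-- opts = [c.upper(), c.lower()] + common_subs.get(c, [])
def pvOptsB (c : Char) : List (List Char) :=
  [c.toUpper] :: [c.toLower] :: PySem.Dict.getD commonSubs c []

-- B's recursion on password[:-1]; the port recurses on the reversed character list
-- (head = password[-1]), which is the same recursion on the last character
def pvGenRev : List Char → List (List Char)
  | [] => [[]]
  | c :: rest =>
    let prefixes := pvGenRev rest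
    (pvOptsB c).flatMap (fun o => prefixes.map (fun v => v ++ o))

def gen_variations_alt (password : String) : List String :=
  (pvGenRev password.toList.reverse).map (fun v => String.ofList v)

-- ===== PRECONDITION & SPEC =====
def Spec_gen_variations (password : String) (out : List String) : Prop := out = gen_variations_alt password
instance (password : String) (out : List String) : Decidable (Spec_gen_variations password out) := by unfold Spec_gen_variations; infer_instance

-- ===== CLAIM (what is proved, stated in full; the proofs are below) =====
def Claim_equal_gen_variations : Prop := ∀ (password : String), Dom_gen_variations password → Spec_gen_variations password (gen_variations password)

-- ===== LEMMAS AND PROOFS =====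
theorem pvStepA_eq_flatMap (pv : List (List Char)) (p : Char) :
    pvStepA pv p = (pvOptsB p).flatMap (fun o => pv.map (fun v => v ++ o)) := by
  unfold pvStepA pvOptsB
  rw [PySem.Dict.getD_eq_get?_getD]
  cases h : PySem.Dict.get? commonSubs p with
  | none => simp [h]
  | some subs =>
    simp [h, List.flatMap_cons, PySem.List.foldl_append_eq_flatMap, List.append_assoc, List.flatMap_def]

theorem pvFoldl_eq_genRev (r : List Char) :
    List.foldl pvStepA [[]] r.reverse = pvGenRev r := by
  induction r with
  | nil => rfl
  | cons c rest ih =>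
    simp only [List.reverse_cons, List.foldl_append, List.foldl_cons, List.foldl_nil, ih,
      pvGenRev, pvStepA_eq_flatMap]

theorem gen_variations_eq_alt (password : String) :
    gen_variations password = gen_variations_alt password := by
  unfold gen_variations gen_variations_alt
  rw [← pvFoldl_eq_genRev, List.reverse_reverse]

-- ===== VERDICT (by name: the statement is the Claim_ definition above) =====
theorem gen_variations_spec : Claim_equal_gen_variations := by
  intro password _
  exact gen_variations_eq_alt password
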